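-- pv_equiv track=rewrite | github.com/Aditya-Mishra19/TCS-NQT-2024-Coding-Solutions | 06 MAY SHIFT 1/SORT NUMBERS/code.py | sortBySwap
-- ===== SOURCE A (Python) =====
-- def sortBySwap(arr, N):
--     left = 0
--     mid = 0
--     right = N - 1
--     while mid <= right:
--         if arr[mid] == '3':
--             arr[left], arr[mid] = arr[mid], arr[left]
--             left += 1
--             mid += 1
--
--         elif arr[mid] == '6':
--             mid += 1
--
--         elif arr[mid] == '7':
--             arr[right], arr[mid] = arr[mid], arr[right]
--             right -= 1
--     return arr
-- ===== SOURCE B (Python) =====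
-- def sortBySwap(arr, N):
--     c3 = c6 = c7 = 0
--     for i in range(N):
--         if arr[i] == '3':
--             c3 += 1
--         elif arr[i] == '6':
--             c6 += 1
--         elif arr[i] == '7':
--             c7 += 1
--     arr[0:c3] = ['3'] * c3
--     arr[c3:c3 + c6] = ['6'] * c6
--     arr[c3 + c6:c3 + c6 + c7] = ['7'] * c7
--     return arr
-- ===== Notes on version B (the rewrite author's own statement) =====
-- stated objective: alternative
-- what changed: Replaced the three-pointer Dutch-national-flag swapping loop with a single counting pass over arr[0:N] followed by overwriting the first N slots with the counted runs of '3', '6' and '7' via slice assignment; unlike A, B also terminates on values outside {'3','6','7'} (outside Pre_).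
import Mathlib
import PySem

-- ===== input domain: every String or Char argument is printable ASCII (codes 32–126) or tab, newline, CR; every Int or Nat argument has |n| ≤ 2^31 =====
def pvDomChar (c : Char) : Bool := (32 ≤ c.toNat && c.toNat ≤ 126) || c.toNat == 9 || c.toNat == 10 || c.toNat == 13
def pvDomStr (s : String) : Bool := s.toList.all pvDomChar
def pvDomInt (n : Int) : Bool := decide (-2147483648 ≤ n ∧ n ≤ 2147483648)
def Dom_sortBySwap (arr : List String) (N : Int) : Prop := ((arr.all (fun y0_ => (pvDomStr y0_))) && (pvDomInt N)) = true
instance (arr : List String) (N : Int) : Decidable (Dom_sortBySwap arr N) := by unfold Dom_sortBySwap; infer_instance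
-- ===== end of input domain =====

-- B replaces A's Dutch-national-flag swapping loop with one counting pass over arr[0:N] followed
-- by overwriting the first N slots ('3's, then '6's, then '7's) via slice assignment; the
-- equivalence proved here is about the return value (both Pythons also mutate `arr` in place).

-- ===== PORT A =====
-- A's while loop; `fuel` only makes the recursion total (inside Pre_ it never runs out: the
-- measure right-mid shrinks every iteration).  The branch where arr[mid] is none of '3'/'6'/'7'
-- makes Python A loop forever, and pyGet? = none is an IndexError; both are excluded by Pre_,
-- the port returns the current list there.
def sortBySwapLoop (fuel : Nat) (arr : List String) (left mid right : Int) : List String :=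
  match fuel with
  | 0 => arr
  | f + 1 =>
    if mid ≤ right then
      match PySem.List.pyGet? arr mid with
      | none => arr
      | some v =>
        if v = "3" then
          match PySem.List.pyGet? arr left with
          | none => arr
          | some w =>
            sortBySwapLoop f (PySem.List.pySetD (PySem.List.pySetD arr left v) mid w)
              (left + 1) (mid + 1) right
        else if v = "6" then
          sortBySwapLoop f arr left (mid + 1) right
        else if v = "7" then
          match PySem.List.pyGet? arr right with
          | none => arr
          | some w =>
            sortBySwapLoop f (PySem.List.pySetD (PySem.List.pySetD arr right v) mid w)
              left mid (right - 1)
        else arr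
    else arr

def sortBySwap (arr : List String) (N : Int) : List String :=
  sortBySwapLoop (N.toNat + 1) arr 0 0 (N - 1)

-- ===== PORT B =====
-- Python slice assignment l[a:b] = xs for the nonnegative bounds B uses (exact there: take/drop
-- clamp exactly as Python clamps slice bounds).
def pySetSlice (l : List String) (a b : Nat) (xs : List String) : List String :=
  l.take a ++ xs ++ l.drop (max a b)

-- body of B's counting for-loop
def sortBySwapCount (arr : List String) (c : Nat × Nat × Nat) (i : Int) : Nat × Nat × Nat :=
  match PySem.List.pyGet? arr i with
  | none => c
  | some v =>
    if v = "3" then (c.1 + 1, c.2.1, c.2.2)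
    else if v = "6" then (c.1, c.2.1 + 1, c.2.2)
    else if v = "7" then (c.1, c.2.1, c.2.2 + 1)
    else c

def sortBySwap_alt (arr : List String) (N : Int) : List String :=
  let c := (PySem.List.pyRange 0 N 1).foldl (sortBySwapCount arr) (0, 0, 0)
  let l1 := pySetSlice arr 0 c.1 (List.replicate c.1 "3")
  let l2 := pySetSlice l1 c.1 (c.1 + c.2.1) (List.replicate c.2.1 "6")
  pySetSlice l2 (c.1 + c.2.1) (c.1 + c.2.1 + c.2.2) (List.replicate c.2.2 "7")

-- ===== PRECONDITION & SPEC =====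
-- Pre_ is exactly where Python A returns: N > len(arr) raises IndexError, and any element of
-- arr[0:N] outside {'3','6','7'} makes A's while loop run forever (no value is returned either way).
def Pre_sortBySwap (arr : List String) (N : Int) : Prop :=
  N ≤ (arr.length : Int) ∧ ∀ s ∈ arr.take N.toNat, s = "3" ∨ s = "6" ∨ s = "7"
instance (arr : List String) (N : Int) : Decidable (Pre_sortBySwap arr N) := by
  unfold Pre_sortBySwap; infer_instance

def pvWitness_sortBySwap : List String × Int := (["7", "3", "6", "3", "x"], 4)

def Spec_sortBySwap (arr : List String) (N : Int) (out : List String) : Prop :=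
  out = sortBySwap_alt arr N
instance (arr : List String) (N : Int) (out : List String) : Decidable (Spec_sortBySwap arr N out) := by
  unfold Spec_sortBySwap; infer_instance

-- ===== CLAIM (what is proved, stated in full; the proofs are below) =====
def Claim_equal_sortBySwap : Prop := ∀ (arr : List String) (N : Int),
  Dom_sortBySwap arr N → Pre_sortBySwap arr N → Spec_sortBySwap arr N (sortBySwap arr N)

-- ===== LEMMAS AND PROOFS =====

-- the common normal form both programs produce: as many '3's, '6's, '7's as arr[0:n] contains,
-- then the untouched tail
def fillSpec (arr : List String) (n : Nat) : List String :=
  List.replicate ((arr.take n).count "3") "3" ++ List.replicate ((arr.take n).count "6") "6" ++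
    List.replicate ((arr.take n).count "7") "7" ++ arr.drop n

lemma count_swap_set {α : Type} [BEq α] [LawfulBEq α] (t : List α) (a b : Nat)
    (ha : a < t.length) (hb : b < t.length) (x : α) :
    ((t.set a t[b]).set b t[a]).count x = t.count x := by
  have hb' : b < (t.set a t[b]).length := by simpa using hb
  rw [List.count_set hb', List.count_set ha]
  have hab : (t.set a t[b])[b] = t[b] := by
    rw [List.getElem_set]; split <;> simp_all
  rw [hab]
  have h1 : (if (t[a] == x) = true then 1 else 0) ≤ t.count x := by
    split
    · rename_i h; exact List.one_le_count_iff.mpr (eq_of_beq h ▸ List.getElem_mem ha)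
    · omega
  omega

lemma fillSpec_swap (arr : List String) (a b n : Nat) (ha : a < n) (hb : b < n)
    (ha' : a < arr.length) (hb' : b < arr.length) :
    fillSpec ((arr.set a arr[b]).set b arr[a]) n = fillSpec arr n := by
  have hta : a < (arr.take n).length := by simp; omega
  have htb : b < (arr.take n).length := by simp; omega
  have htake : ((arr.set a arr[b]).set b arr[a]).take n
      = ((arr.take n).set a (arr.take n)[b]).set b (arr.take n)[a] := by
    simp [List.take_set, List.getElem_take]
  have hdrop : ((arr.set a arr[b]).set b arr[a]).drop n = arr.drop n := by
    rw [List.drop_set, if_pos hb, List.drop_set, if_pos ha]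
  unfold fillSpec
  rw [htake, hdrop, count_swap_set (arr.take n) a b hta htb,
    count_swap_set (arr.take n) a b hta htb, count_swap_set (arr.take n) a b hta htb]

-- a list that is literally 3-segment ++ 6-segment ++ 7-segment ++ tail IS its own fillSpec
lemma fillSpec_base (arr : List String) (n l m : Nat) (hn : n ≤ arr.length)
    (hl : l ≤ m) (hm : m ≤ n)
    (h3 : ∀ i (hi : i < arr.length), i < l → arr[i] = "3")
    (h6 : ∀ i (hi : i < arr.length), l ≤ i → i < m → arr[i] = "6")
    (h7 : ∀ i (hi : i < arr.length), m ≤ i → i < n → arr[i] = "7") :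
    arr = fillSpec arr n := by
  have ht : arr.take n
      = List.replicate l "3" ++ List.replicate (m - l) "6" ++ List.replicate (n - m) "7" := by
    apply List.ext_getElem
    · simp; omega
    · intro i h1 h2
      have hi : i < n := by simp at h1; omega
      have hi' : i < arr.length := by omega
      rw [List.getElem_take]
      rcases lt_or_ge i l with hc | hc
      · rw [h3 i hi' hc, List.getElem_append_left (by simp; omega),
          List.getElem_append_left (by simpa using hc)]
        simp
      · rcases lt_or_ge i m with hc2 | hc2
        · rw [h6 i hi' hc hc2, List.getElem_append_left (by simp; omega),
            List.getElem_append_right (by simpa using hc)]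
          simp
        · rw [h7 i hi' hc2 hi, List.getElem_append_right (by simp; omega)]
          simp
  have c3 : (arr.take n).count "3" = l := by rw [ht]; simp [List.count_replicate]
  have c6 : (arr.take n).count "6" = m - l := by rw [ht]; simp [List.count_replicate]
  have c7 : (arr.take n).count "7" = n - m := by rw [ht]; simp [List.count_replicate]
  unfold fillSpec
  rw [c3, c6, c7]
  rw [show List.replicate l "3" ++ List.replicate (m - l) "6" ++
      List.replicate (n - m) "7" ++ arr.drop n
      = (List.replicate l "3" ++ List.replicate (m - l) "6" ++ List.replicate (n - m) "7")
        ++ arr.drop n by simp]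
  rw [← ht, List.take_append_drop]

-- the Dutch-flag loop reaches fillSpec (the loop invariant, by induction on fuel)
lemma loopA_eq_fillSpec (fuel : Nat) : ∀ (arr : List String) (l m e n : Nat),
    n ≤ arr.length → l ≤ m → m ≤ e → e ≤ n → e - m ≤ fuel →
    (∀ i (hi : i < arr.length), i < l → arr[i] = "3") →
    (∀ i (hi : i < arr.length), l ≤ i → i < m → arr[i] = "6") →
    (∀ i (hi : i < arr.length), e ≤ i → i < n → arr[i] = "7") →
    (∀ i (hi : i < arr.length), m ≤ i → i < e → (arr[i] = "3" ∨ arr[i] = "6" ∨ arr[i] = "7")) →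
    sortBySwapLoop fuel arr ↑l ↑m (↑e - 1) = fillSpec arr n := by
  induction fuel with
  | zero =>
    intro arr l m e n hn hl hm he hfuel h3 h6 h7 hmid
    have hme : m = e := by omega
    subst hme
    rw [show sortBySwapLoop 0 arr ↑l ↑m (↑m - 1) = arr from rfl]
    exact fillSpec_base arr n l m hn hl (by omega) h3 h6 h7
  | succ f ih =>
    intro arr l m e n hn hl hm he hfuel h3 h6 h7 hmid
    rcases lt_or_ge m e with hme | hme
    · -- loop body runs
      have hmn : m < arr.length := by omega
      have hL : l < arr.length := by omega
      have hE1 : e - 1 < arr.length := by omega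
      have hgm : PySem.List.pyGet? arr (↑m : Int) = some arr[m] := by
        simp [List.getElem?_eq_getElem hmn]
      rw [sortBySwapLoop, if_pos (show (↑m : Int) ≤ ↑e - 1 by omega)]
      simp only [hgm]
      rcases hmid m hmn (le_refl m) hme with hv | hv | hv
      · -- arr[m] = '3': swap left/mid, advance both
        have hgl : PySem.List.pyGet? arr (↑l : Int) = some arr[l] := by
          simp [List.getElem?_eq_getElem hL]
        rw [hv, if_pos rfl]
        simp only [hgl]
        have hset : PySem.List.pySetD (PySem.List.pySetD arr (↑l) "3") (↑m) arr[l]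
            = (arr.set l arr[m]).set m arr[l] := by
          simp [hv]
        simp only [hset]
        set arr' := (arr.set l arr[m]).set m arr[l] with harr'
        have hlen' : arr'.length = arr.length := by simp [harr']
        have hget : ∀ i (hi : i < arr.length),
            arr'[i]'(by omega) = if m = i then arr[l] else if l = i then arr[m] else arr[i] := by
          intro i hi
          simp only [harr', List.getElem_set]
    
        have goal' : sortBySwapLoop f arr' (↑(l+1)) (↑(m+1)) (↑e - 1) = fillSpec arr' n := by
          apply ih arr' (l+1) (m+1) e n (by omega) (by omega) (by omega) (by omega) (by omega)
          · intro i hi hil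
            rw [hget i (by omega)]
            split
            · rename_i h; have hlm : l = m := by omega
              rw [show arr[l] = arr[m] by congr 1]
              exact hv
            · split
              · exact hv
              · rename_i h1 h2; exact h3 i (by omega) (by omega)
          · intro i hi h1 h2
            rw [hget i (by omega)]
            split
            · rename_i h; exact h6 l hL (le_refl l) (by omega)
            · split
              · rename_i h h'; omega
              · rename_i h h'; exact h6 i (by omega) (by omega) (by omega)
          · intro i hi h1 h2
            rw [hget i (by omega)]
            rw [if_neg (by omega), if_neg (by omega)]
            exact h7 i (by omega) h1 h2
          · intro i hi h1 h2
            rw [hget i (by omega)]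
            rw [if_neg (by omega), if_neg (by omega)]
            exact hmid i (by omega) (by omega) h2
        rw [show ((↑l : Int) + 1) = (↑(l+1) : Int) by omega,
          show ((↑m : Int) + 1) = (↑(m+1) : Int) by omega, goal']
        exact fillSpec_swap arr l m n (by omega) (by omega) hL hmn
      · -- arr[m] = '6': advance mid
        rw [hv, if_neg (by decide), if_pos rfl]
        have goal' : sortBySwapLoop f arr ↑l (↑(m+1)) (↑e - 1) = fillSpec arr n := by
          apply ih arr l (m+1) e n hn (by omega) (by omega) he (by omega) h3 _ h7
          · intro i hi h1 h2
            exact hmid i hi (by omega) h2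
          · intro i hi h1 h2
            rcases lt_or_ge i m with hc | hc
            · exact h6 i hi h1 hc
            · have : i = m := by omega
              subst this; exact hv
        rw [show ((↑m : Int) + 1) = (↑(m+1) : Int) by omega, goal']
      · -- arr[m] = '7': swap mid/right, shrink right
        rw [hv, if_neg (by decide), if_neg (by decide), if_pos rfl]
        -- reduce the inner match below
        have he1 : ((↑e : Int) - 1) = (↑(e-1) : Int) := by omega
        have hgr : PySem.List.pyGet? arr ((↑e : Int) - 1) = some arr[e-1] := by
          rw [he1]; simp [List.getElem?_eq_getElem hE1]
        simp only [hgr]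
        have hset : PySem.List.pySetD (PySem.List.pySetD arr ((↑e : Int) - 1) "7") (↑m) arr[e-1]
            = (arr.set (e-1) arr[m]).set m arr[e-1] := by
          rw [he1]; simp [hv]
        simp only [hset]
        set arr' := (arr.set (e-1) arr[m]).set m arr[e-1] with harr'
        have hlen' : arr'.length = arr.length := by simp [harr']
        have hget : ∀ i (hi : i < arr.length),
            arr'[i]'(by omega) = if m = i then arr[e-1] else if e-1 = i then arr[m] else arr[i] := by
          intro i hi
          simp only [harr', List.getElem_set]
        have goal' : sortBySwapLoop f arr' ↑l ↑m (↑(e-1) - 1) = fillSpec arr' n := by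
          apply ih arr' l m (e-1) n (by omega) hl (by omega) (by omega) (by omega)
          · intro i hi h1
            rw [hget i (by omega), if_neg (by omega), if_neg (by omega)]
            exact h3 i (by omega) h1
          · intro i hi h1 h2
            rw [hget i (by omega), if_neg (by omega), if_neg (by omega)]
            exact h6 i (by omega) h1 h2
          · intro i hi h1 h2
            rw [hget i (by omega)]
            split
            · rename_i h
              rw [show arr[e-1] = arr[m] by congr 1; omega]
              exact hv
            · split
              · exact hv
              · rename_i hh1 hh2
                exact h7 i (by omega) (by omega) h2
          · intro i hi h1 h2
            rw [hget i (by omega)]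
            split
            · rename_i h
              exact hmid (e-1) (by omega) (by omega) (by omega)
            · split
              · rename_i hh1 hh2; omega
              · exact hmid i (by omega) h1 (by omega)
        rw [show ((↑e : Int) - 1 - 1) = ((↑(e-1) : Int) - 1) by omega, goal']
        exact fillSpec_swap arr (e-1) m n (by omega) (by omega) hE1 hmn
    · -- m ≥ e: the loop exits immediately
      have hme' : m = e := by omega
      subst hme'
      rw [sortBySwapLoop, if_neg (by omega)]
      exact fillSpec_base arr n l m hn hl (by omega) h3 h6 h7

-- B's counting loop computes the three counts of arr[0:n]
lemma fold_counts (arr : List String) (n : Nat) (h : n ≤ arr.length) :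
    ((List.range n).map (fun (k : Nat) => (k : Int))).foldl (sortBySwapCount arr) (0, 0, 0)
      = ((arr.take n).count "3", (arr.take n).count "6", (arr.take n).count "7") := by
  induction n with
  | zero => simp
  | succ k ihk =>
    have hk : k < arr.length := by omega
    rw [List.range_succ, List.map_append, List.foldl_append, ihk (by omega)]
    have htk : arr.take (k+1) = arr.take k ++ [arr[k]] := by
      rw [List.take_succ, List.getElem?_eq_getElem hk]; rfl
    have hcnt : ∀ x : String, (arr.take (k+1)).count x
        = (arr.take k).count x + (if arr[k] = x then 1 else 0) := by
      intro x
      rw [htk, List.count_append]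
      simp [List.count_cons]
    simp only [List.map_cons, List.map_nil, List.foldl_cons, List.foldl_nil]
    unfold sortBySwapCount
    rw [show PySem.List.pyGet? arr (↑k : Int) = some arr[k] by
      simp [List.getElem?_eq_getElem hk]]
    by_cases h3 : arr[k] = "3"
    · simp [h3, hcnt, Prod.ext_iff]
    · by_cases h6 : arr[k] = "6"
      · simp [h3, h6, hcnt, Prod.ext_iff]
      · by_cases h7 : arr[k] = "7"
        · simp [h3, h6, h7, hcnt, Prod.ext_iff]
        · simp [h3, h6, h7, hcnt, Prod.ext_iff]

-- when every element is a '3', '6' or '7', the three counts exhaust the list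
lemma counts_sum (t : List String) (good : ∀ s ∈ t, s = "3" ∨ s = "6" ∨ s = "7") :
    t.count "3" + t.count "6" + t.count "7" = t.length := by
  induction t with
  | nil => simp
  | cons x xs ihx =>
    have hx := good x List.mem_cons_self
    have ihx' := ihx (fun s hs => good s (List.mem_cons_of_mem x hs))
    rcases hx with h | h | h <;>
      simp [h, List.count_cons] <;> omega

-- B computes fillSpec
lemma B_eq_fillSpec (arr : List String) (N : Int) (h1 : N ≤ (arr.length : Int))
    (h2 : ∀ s ∈ arr.take N.toNat, s = "3" ∨ s = "6" ∨ s = "7") :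
    sortBySwap_alt arr N = fillSpec arr N.toNat := by
  rcases lt_or_ge N 0 with hN | hN
  · have h0 : N.toNat = 0 := by omega
    rw [h0]
    unfold sortBySwap_alt
    rw [PySem.List.pyRange_one_eq_nil (by omega)]
    simp [pySetSlice, fillSpec]
  · have hn : N.toNat ≤ arr.length := by omega
    have hrange : PySem.List.pyRange 0 N 1
        = (List.range N.toNat).map (fun (k : Nat) => (k : Int)) := by
      rw [PySem.List.pyRange_one]
      simp
    have hsum : (arr.take N.toNat).count "3" + (arr.take N.toNat).count "6"
        + (arr.take N.toNat).count "7" = N.toNat := by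
      rw [counts_sum _ h2]
      simp
      omega
    unfold sortBySwap_alt
    rw [hrange, fold_counts arr N.toNat hn]
    set c3 := (arr.take N.toNat).count "3" with hc3
    set c6 := (arr.take N.toNat).count "6" with hc6
    set c7 := (arr.take N.toNat).count "7" with hc7
    have e1 : pySetSlice arr 0 c3 (List.replicate c3 "3")
        = List.replicate c3 "3" ++ arr.drop c3 := by
      simp [pySetSlice]
    have e2 : pySetSlice (List.replicate c3 "3" ++ arr.drop c3) c3 (c3 + c6)
          (List.replicate c6 "6")
        = List.replicate c3 "3" ++ List.replicate c6 "6" ++ arr.drop (c3 + c6) := by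
      unfold pySetSlice
      rw [List.take_left' (by simp), show max c3 (c3 + c6) = c3 + c6 by omega,
        List.drop_append, List.drop_replicate]
      simp only [List.length_replicate]
      rw [show c3 - (c3 + c6) = 0 by omega, Nat.add_sub_cancel_left, List.drop_drop]
      simp
    have e3 : pySetSlice (List.replicate c3 "3" ++ List.replicate c6 "6" ++ arr.drop (c3 + c6))
          (c3 + c6) (c3 + c6 + c7) (List.replicate c7 "7")
        = List.replicate c3 "3" ++ List.replicate c6 "6" ++ List.replicate c7 "7"
          ++ arr.drop (c3 + c6 + c7) := by
      unfold pySetSlice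
      rw [List.take_left' (by simp), show max (c3 + c6) (c3 + c6 + c7) = c3 + c6 + c7 by omega,
        List.drop_append, List.drop_eq_nil_of_le (by simp)]
      simp only [List.length_append, List.length_replicate]
      rw [Nat.add_sub_cancel_left, List.drop_drop, List.nil_append]
    show pySetSlice
        (pySetSlice (pySetSlice arr 0 c3 (List.replicate c3 "3")) c3 (c3 + c6)
          (List.replicate c6 "6"))
        (c3 + c6) (c3 + c6 + c7) (List.replicate c7 "7") = fillSpec arr N.toNat
    rw [e1, e2, e3, hsum]
    unfold fillSpec
    rw [← hc3, ← hc6, ← hc7]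

-- ===== VERDICT (by name: the statement is the Claim_ definition above) =====
theorem sortBySwap_spec : Claim_equal_sortBySwap := by
  intro arr N _ hpre
  obtain ⟨h1, h2⟩ := hpre
  unfold Spec_sortBySwap
  rw [B_eq_fillSpec arr N h1 h2]
  rcases lt_or_ge N 0 with hN | hN
  · have h0 : N.toNat = 0 := by omega
    unfold sortBySwap
    rw [h0, sortBySwapLoop, if_neg (by omega)]
    simp [fillSpec]
  · have hn : N.toNat ≤ arr.length := by omega
    unfold sortBySwap
    rw [show (N - 1 : Int) = (↑N.toNat : Int) - 1 by omega,
      show (0 : Int) = (↑(0 : Nat) : Int) by simp]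
    apply loopA_eq_fillSpec (N.toNat + 1) arr 0 0 N.toNat N.toNat hn (by omega) (by omega)
      (by omega) (by omega)
    · intro i hi h; omega
    · intro i hi hle hlt; omega
    · intro i hi hle hlt; omega
    · intro i hi _ hlt
      have hmem : arr[i] ∈ arr.take N.toNat := by
        have : (arr.take N.toNat)[i]'(by simp; omega) ∈ arr.take N.toNat := List.getElem_mem _
        rwa [List.getElem_take] at this
      exact h2 _ hmem
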